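-- pv_equiv track=rewrite | github.com/bmwant/jaaam | 2008/b/b.py | solve
-- ===== SOURCE A (Python) =====
-- from enum import IntEnum
--
-- class Priority(IntEnum):
--     B_ARV = 1  # arrived from B station (available at A)
--     A_ARV = 2  # arrived from A station (available at B)
--     A_DPT = 3  # departured from A station (not available at A)
--     B_DPT = 4  # departured from B station (not available at B)
--
-- def solve(schedule) -> int:
--     Amax = 0
--     Bmax = 0
--     A = 0  # track number of trains on A station
--     B = 0  # track number of trains on B station
--     schedule.sort()
--     for t, p in schedule:
--         if p == Priority.A_DPT:
--             A -=1  # train departed from A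
--         elif p == Priority.A_ARV:
--             B += 1  # train can depart from B
--         elif p == Priority.B_DPT:
--             B -= 1  # train departed from B
--         elif p == Priority.B_ARV:
--             A += 1  # train can depart from A
--
--         Amax = min(Amax, A)
--         Bmax = min(Bmax, B)
--     return abs(Amax), abs(Bmax)
-- ===== SOURCE B (Python) =====
-- def _needed(arrivals, departures):
--     # arrivals/departures are sorted time lists for one station; at the i-th
--     # departure the deficit is (i+1) - #(arrivals at or before it), tracked by
--     # a two-pointer merge instead of a running +1/-1 prefix sum.
--     need = 0
--     j = 0
--     for i, t in enumerate(departures):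
--         while j < len(arrivals) and arrivals[j] <= t:
--             j += 1
--         if i + 1 - j > need:
--             need = i + 1 - j
--     return need
--
--
-- def solve(schedule) -> int:
--     schedule.sort()
--     arr_a = [t for t, p in schedule if p == 1]  # B_ARV: train becomes available at A
--     dep_a = [t for t, p in schedule if p == 3]  # A_DPT
--     arr_b = [t for t, p in schedule if p == 2]  # A_ARV: available at B
--     dep_b = [t for t, p in schedule if p == 4]  # B_DPT
--     return _needed(arr_a, dep_a), _needed(arr_b, dep_b)
-- ===== Notes on version B (the rewrite author's own statement) =====
-- stated objective: alternative
-- what changed: Instead of A's fused four-accumulator prefix-minimum scan over the sorted events, B splits each station's events into a sorted arrival-time list and a sorted departure-time list and runs a two-pointer merge sweep: at the i-th departure the deficit is (i+1) minus the arrivals matched so far by an advancing pointer, and the answer is the maximum deficit; sorting stays in place to keep the mutation.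
import Mathlib
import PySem

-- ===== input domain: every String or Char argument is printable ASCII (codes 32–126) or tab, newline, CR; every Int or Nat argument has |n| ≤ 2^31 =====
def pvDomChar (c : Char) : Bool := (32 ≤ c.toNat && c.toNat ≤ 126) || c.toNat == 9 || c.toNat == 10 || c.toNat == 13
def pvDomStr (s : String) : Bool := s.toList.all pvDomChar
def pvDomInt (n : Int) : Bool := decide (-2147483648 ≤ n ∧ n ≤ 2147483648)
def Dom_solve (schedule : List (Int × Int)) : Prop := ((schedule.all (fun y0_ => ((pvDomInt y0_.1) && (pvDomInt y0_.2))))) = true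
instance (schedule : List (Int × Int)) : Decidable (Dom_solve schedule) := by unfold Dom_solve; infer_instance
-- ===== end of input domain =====

-- B replaces A's fused four-accumulator prefix-minimum scan by per-station sorted
-- arrival/departure time lists swept with a two-pointer merge (objective: alternative, same cost).
-- A sorts `schedule` in place; the equivalence proved here is about the return value
-- (B performs the same mutation in Python).

-- ===== PORT A =====
def solveStep (st : Int × Int × Int × Int) (tp : Int × Int) : Int × Int × Int × Int :=
  match st, tp with
  | (Amax, Bmax, A, B), (_, p) =>
    let AB : Int × Int :=
      if p = 3 then (A - 1, B)          -- A_DPT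
      else if p = 2 then (A, B + 1)     -- A_ARV
      else if p = 4 then (A, B - 1)     -- B_DPT
      else if p = 1 then (A + 1, B)     -- B_ARV
      else (A, B)
    (min Amax AB.1, min Bmax AB.2, AB.1, AB.2)

def solve (schedule : List (Int × Int)) : Int × Int :=
  let s := PySem.List.sorted2 schedule (fun x => x.1) (fun x => x.2) false
  let r := s.foldl solveStep (0, 0, 0, 0)
  (|r.1|, |r.2.1|)

-- ===== PORT B =====
-- the `while j < len(arrivals) and arrivals[j] <= t: j += 1` pointer advance
def advance (ar : List Int) (t : Int) (j : Nat) : Nat :=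
  if h : j < ar.length then
    (if ar[j] ≤ t then advance ar t (j + 1) else j)
  else j
termination_by ar.length - j

def neededStep (ar : List Int) (st : Int × Nat) (it : Int × Int) : Int × Nat :=
  let j := advance ar it.2 st.2
  let c := it.1 + 1 - (j : Int)
  (if st.1 < c then c else st.1, j)

def needed (ar dp : List Int) : Int :=
  ((PySem.List.enumerate dp).foldl (neededStep ar) (0, 0)).1

def solve_alt (schedule : List (Int × Int)) : Int × Int :=
  let s := PySem.List.sorted2 schedule (fun x => x.1) (fun x => x.2) false
  let arA := (s.filter (fun tp => tp.2 == 1)).map (fun tp => tp.1)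
  let dpA := (s.filter (fun tp => tp.2 == 3)).map (fun tp => tp.1)
  let arB := (s.filter (fun tp => tp.2 == 2)).map (fun tp => tp.1)
  let dpB := (s.filter (fun tp => tp.2 == 4)).map (fun tp => tp.1)
  (needed arA dpA, needed arB dpB)

-- ===== PRECONDITION & SPEC =====
def Spec_solve (schedule : List (Int × Int)) (out : Int × Int) : Prop := out = solve_alt schedule
instance (schedule : List (Int × Int)) (out : Int × Int) : Decidable (Spec_solve schedule out) := by unfold Spec_solve; infer_instance

-- ===== CLAIM (what is proved, stated in full; the proofs are below) =====
def Claim_equal_solve : Prop := ∀ (schedule : List (Int × Int)), Dom_solve schedule → Spec_solve schedule (solve schedule)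

-- ===== LEMMAS AND PROOFS =====

-- Python's lexicographic tuple (≤) on (time, priority)
def lexLe (a b : Int × Int) : Prop := a.1 < b.1 ∨ (a.1 = b.1 ∧ a.2 ≤ b.2)

-- the strict-lex boolean `sorted2` sorts by (keys fst, snd)
def bLT (a b : Int × Int) : Bool :=
  decide (a.1 < b.1) || (!decide (b.1 < a.1) && decide (a.2 < b.2))

theorem lexLe_of_bLT {a b : Int × Int} (h : bLT a b = true) : lexLe a b := by
  simp [bLT] at h; unfold lexLe; omega

theorem lexLe_of_not_bLT {a b : Int × Int} (h : bLT a b = false) : lexLe b a := by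
  simp [bLT] at h; unfold lexLe; omega

theorem lexLe_trans {a b c : Int × Int} (h1 : lexLe a b) (h2 : lexLe b c) : lexLe a c := by
  unfold lexLe at *; omega

theorem insertBy_pairwise (x : Int × Int) (l : List (Int × Int))
    (h : l.Pairwise lexLe) : (PySem.List.insertBy bLT x l).Pairwise lexLe := by
  induction l with
  | nil => simp [PySem.List.insertBy]
  | cons y ys ih =>
    rw [List.pairwise_cons] at h
    by_cases hb : bLT x y = true
    · simp only [PySem.List.insertBy, hb, if_true]
      refine List.Pairwise.cons ?_ (List.Pairwise.cons h.1 h.2)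
      intro z hz
      rcases List.mem_cons.mp hz with rfl | hzys
      · exact lexLe_of_bLT hb
      · exact lexLe_trans (lexLe_of_bLT hb) (h.1 z hzys)
    · simp only [PySem.List.insertBy, hb]
      refine List.Pairwise.cons ?_ (ih h.2)
      intro z hz
      rw [PySem.List.mem_insertBy] at hz
      rcases hz with rfl | hzys
      · exact lexLe_of_not_bLT (by simpa using hb)
      · exact h.1 z hzys

theorem foldl_insertBy_pairwise (xs : List (Int × Int)) (acc : List (Int × Int))
    (h : acc.Pairwise lexLe) :
    (xs.foldl (fun acc x => PySem.List.insertBy bLT x acc) acc).Pairwise lexLe := by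
  induction xs generalizing acc with
  | nil => exact h
  | cons x xs ih => exact ih _ (insertBy_pairwise x acc h)

theorem sorted2_pairwise_lex (xs : List (Int × Int)) :
    (PySem.List.sorted2 xs (fun x => x.1) (fun x => x.2) false).Pairwise lexLe := by
  have : PySem.List.sorted2 xs (fun x => x.1) (fun x => x.2) false
      = xs.foldl (fun acc x => PySem.List.insertBy bLT x acc) [] := rfl
  rw [this]
  exact foldl_insertBy_pairwise xs [] (by simp)

-- number of arrivals at or before time t
def cnt (ar : List Int) (t : Int) : Nat := ar.countP (fun x => decide (x ≤ t))

theorem cnt_le_length (ar : List Int) (t : Int) : cnt ar t ≤ ar.length :=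
  List.countP_le_length

theorem cnt_mono (ar : List Int) {t t' : Int} (h : t ≤ t') : cnt ar t ≤ cnt ar t' :=
  List.countP_mono_left (fun a _ ha => by simp at ha ⊢; omega)

theorem cnt_append_singleton (ar : List Int) (u t : Int) :
    cnt (ar ++ [u]) t = cnt ar t + (if u ≤ t then 1 else 0) := by
  simp only [cnt, List.countP_append, List.countP_cons, List.countP_nil]
  split_ifs <;> simp_all

theorem cnt_eq_length (ar : List Int) (t : Int) (h : ∀ x ∈ ar, x ≤ t) :
    cnt ar t = ar.length := by
  rw [cnt, List.countP_eq_length]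
  intro a ha; simpa using h a ha

-- sorted interval facts used by the pointer advance
theorem le_cnt_of_getElem_le (ar : List Int) (hs : ar.Pairwise (· ≤ ·)) (t : Int)
    (j : Nat) (hj : j < ar.length) (h : ar[j] ≤ t) : j + 1 ≤ cnt ar t := by
  have hall : ∀ a ∈ ar.take (j + 1), (fun x => decide (x ≤ t)) a = true := by
    intro a ha
    rcases List.mem_take_iff_getElem.mp ha with ⟨k, hk, rfl⟩
    have hkl : k < ar.length := by omega
    have hky : ar[k] ≤ ar[j] := by
      rcases Nat.lt_or_ge k j with hlt | hge
      · exact (List.pairwise_iff_getElem.mp hs) k j hkl hj hlt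
      · have hkj : k = j := by omega
        subst hkj; exact le_refl _
    simp; omega
  have h1 : (ar.take (j + 1)).countP (fun x => decide (x ≤ t)) = (ar.take (j + 1)).length :=
    List.countP_eq_length.mpr hall
  have h2 : (ar.take (j + 1)).length = j + 1 := by simp; omega
  have h3 : cnt ar t = (ar.take (j + 1)).countP (fun x => decide (x ≤ t))
      + (ar.drop (j + 1)).countP (fun x => decide (x ≤ t)) := by
    rw [cnt]
    conv_lhs => rw [← List.take_append_drop (j + 1) ar]
    rw [List.countP_append]
  omega

theorem cnt_le_of_lt_getElem (ar : List Int) (hs : ar.Pairwise (· ≤ ·)) (t : Int)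
    (j : Nat) (hj : j < ar.length) (h : t < ar[j]) : cnt ar t ≤ j := by
  have hdrop : (ar.drop j).countP (fun x => decide (x ≤ t)) = 0 := by
    rw [List.countP_eq_zero]
    intro a ha
    rcases List.mem_drop_iff_getElem.mp ha with ⟨k, hk, rfl⟩
    have : ar[j] ≤ ar[j + k] := by
      rcases Nat.eq_zero_or_pos k with rfl | hkpos
      · simp
      · exact (List.pairwise_iff_getElem.mp hs) j (j + k) hj (by omega) (by omega)
    simp; omega
  have : cnt ar t = (ar.take j).countP (fun x => decide (x ≤ t)) := by
    rw [cnt, ← List.take_append_drop j ar, List.countP_append]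
    simp at hdrop ⊢
    omega
  calc cnt ar t = (ar.take j).countP (fun x => decide (x ≤ t)) := this
    _ ≤ (ar.take j).length := List.countP_le_length
    _ ≤ j := by simp

theorem advance_eq (ar : List Int) (hs : ar.Pairwise (· ≤ ·)) (t : Int) :
    ∀ j, j ≤ cnt ar t → advance ar t j = cnt ar t := by
  intro j
  fun_induction advance ar t j with
  | case1 j h hle ih =>
    intro hj
    apply ih
    exact le_cnt_of_getElem_le ar hs t j h hle
  | case2 j h hgt =>
    intro hj
    have := cnt_le_of_lt_getElem ar hs t j h (by omega)
    omega
  | case3 j h =>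
    intro hj
    have := cnt_le_length ar t
    omega

-- the channel scan used only by the proofs: deficit and its running max
def chanStep (pa pd : Int) (st : Int × Int) (tp : Int × Int) : Int × Int :=
  let d : Int := if tp.2 = pd then 1 else if tp.2 = pa then -1 else 0
  (st.1 + d, max st.2 (st.1 + d))

def neededSpec (ar dp : List Int) : Int :=
  (PySem.List.enumerate dp).foldl (fun nd it => max nd (it.1 + 1 - (cnt ar it.2 : Int))) 0

-- B's two-pointer sweep computes neededSpec on sorted inputs
theorem needed_go (ar : List Int) (har : ar.Pairwise (· ≤ ·)) :
    ∀ (dp : List Int) (n : Int) (need : Int) (j : Nat), dp.Pairwise (· ≤ ·) →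
      (∀ x ∈ dp, j ≤ cnt ar x) →
      ((PySem.List.enumerate dp n).foldl (neededStep ar) (need, j)).1 =
        (PySem.List.enumerate dp n).foldl (fun nd it => max nd (it.1 + 1 - (cnt ar it.2 : Int))) need := by
  intro dp
  induction dp with
  | nil => intro n need j _ _; simp [PySem.List.enumerate_nil]
  | cons t tl ih =>
    intro n need j hdp hj
    rw [List.pairwise_cons] at hdp
    rw [PySem.List.enumerate_cons]
    simp only [List.foldl_cons]
    have hadv : advance ar t j = cnt ar t :=
      advance_eq ar har t j (hj t (List.mem_cons_self))
    have hstep : neededStep ar (need, j) (n, t) = (max need (n + 1 - (cnt ar t : Int)), cnt ar t) := by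
      simp only [neededStep, hadv, max_def]
      split_ifs <;> simp [Prod.ext_iff] <;> omega
    rw [hstep]
    exact ih (n + 1) _ (cnt ar t) hdp.2
      (fun x hx => le_trans (cnt_mono ar (hdp.1 x hx)) (le_refl _))

theorem needed_eq_spec (ar dp : List Int) (har : ar.Pairwise (· ≤ ·))
    (hdp : dp.Pairwise (· ≤ ·)) : needed ar dp = neededSpec ar dp := by
  unfold needed neededSpec
  exact needed_go ar har dp 0 0 0 hdp (fun x _ => Nat.zero_le _)

theorem enumerate_append_singleton (dp : List Int) (t : Int) :
    PySem.List.enumerate (dp ++ [t]) 0 =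
      PySem.List.enumerate dp 0 ++ [((dp.length : Int), t)] := by
  rw [PySem.List.enumerate_append]
  simp [PySem.List.enumerate_cons, PySem.List.enumerate_nil]

theorem neededSpec_append_dep (ar dp : List Int) (t : Int) :
    neededSpec ar (dp ++ [t]) =
      max (neededSpec ar dp) ((dp.length : Int) + 1 - (cnt ar t : Int)) := by
  unfold neededSpec
  rw [enumerate_append_singleton, List.foldl_append]
  simp

theorem mem_of_mem_enumerate {α : Type} {it : Int × α} {l : List α} {n : Int}
    (h : it ∈ PySem.List.enumerate l n) : it.2 ∈ l := by
  rw [PySem.List.mem_enumerate_iff] at h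
  rcases h with ⟨k, hk, rfl⟩
  simp

theorem neededSpec_append_arr (ar dp : List Int) (u : Int)
    (h : ∀ x ∈ dp, x < u) : neededSpec (ar ++ [u]) dp = neededSpec ar dp := by
  unfold neededSpec
  apply List.foldl_ext
  intro nd it hit
  have hx : it.2 < u := h it.2 (mem_of_mem_enumerate hit)
  rw [cnt_append_singleton]
  have : ¬ (u ≤ it.2) := by omega
  simp [this]

-- filters over an appended event
theorem filtmap_append_eq (s : List (Int × Int)) (t q : Int) :
    ((s ++ [(t, q)]).filter (fun tp => tp.2 == q)).map (fun tp => tp.1) =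
      ((s.filter (fun tp => tp.2 == q)).map (fun tp => tp.1)) ++ [t] := by
  rw [List.filter_append, List.map_append]
  simp

theorem filtmap_append_ne (s : List (Int × Int)) (t p q : Int) (h : p ≠ q) :
    ((s ++ [(t, p)]).filter (fun tp => tp.2 == q)).map (fun tp => tp.1) =
      (s.filter (fun tp => tp.2 == q)).map (fun tp => tp.1) := by
  rw [List.filter_append, List.map_append]
  simp [h]

-- the main channel identity on a lex-sorted event list
theorem chan_main (pa pd : Int) (hlt : pa < pd) (s : List (Int × Int))
    (hs : s.Pairwise lexLe) :
    (s.foldl (chanStep pa pd) (0, 0)).1 =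
        ((((s.filter (fun tp => tp.2 == pd)).map (fun tp => tp.1)).length : Int)
          - (((s.filter (fun tp => tp.2 == pa)).map (fun tp => tp.1)).length : Int)) ∧
      (s.foldl (chanStep pa pd) (0, 0)).1 ≤ (s.foldl (chanStep pa pd) (0, 0)).2 ∧
      0 ≤ (s.foldl (chanStep pa pd) (0, 0)).2 ∧
      (s.foldl (chanStep pa pd) (0, 0)).2 =
        neededSpec ((s.filter (fun tp => tp.2 == pa)).map (fun tp => tp.1))
          ((s.filter (fun tp => tp.2 == pd)).map (fun tp => tp.1)) := by
  induction s using List.reverseRecOn with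
  | nil => simp [neededSpec, PySem.List.enumerate_nil]
  | append_singleton s e ih =>
    have hs' : s.Pairwise lexLe := (List.pairwise_append.mp hs).1
    have hle : ∀ x ∈ s, lexLe x e := by
      intro x hx
      exact (List.pairwise_append.mp hs).2.2 x hx e (by simp)
    obtain ⟨ih1, ih2, ih3, ih4⟩ := ih hs'
    set F := s.foldl (chanStep pa pd) (0, 0) with hF
    set ar := (s.filter (fun tp => tp.2 == pa)).map (fun tp => tp.1) with har
    set dp := (s.filter (fun tp => tp.2 == pd)).map (fun tp => tp.1) with hdp
    rw [List.foldl_append]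
    simp only [List.foldl_cons, List.foldl_nil]
    obtain ⟨t, p⟩ := e
    by_cases hpd : p = pd
    · -- departure: new term enters the max
      subst hpd
      have harr : ∀ x ∈ ar, x ≤ t := by
        intro x hx
        rw [har] at hx
        rcases List.mem_map.mp hx with ⟨tp, htp, rfl⟩
        have := hle tp (List.mem_of_mem_filter htp)
        unfold lexLe at this; omega
      have hcnt : cnt ar t = ar.length := cnt_eq_length ar t harr
      have hcs : chanStep pa p F (t, p) = (F.1 + 1, max F.2 (F.1 + 1)) := by
        simp [chanStep]
      rw [filtmap_append_eq, filtmap_append_ne s t p pa (by omega), ← har, ← hdp, hcs,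
          neededSpec_append_dep]
      refine ⟨?_, ?_, ?_, ?_⟩
      · simp [List.length_append, ih1]; omega
      · exact le_max_right F.2 (F.1 + 1)
      · exact le_trans ih3 (le_max_left F.2 (F.1 + 1))
      · rw [← ih4, hcnt]
        show max F.2 (F.1 + 1) = max F.2 ((dp.length : Int) + 1 - (ar.length : Int))
        congr 1
        omega
    · by_cases hpa : p = pa
      · -- arrival: max unchanged, arrival list grows with a time above every departure
        subst hpa
        have hdep : ∀ x ∈ dp, x < t := by
          intro x hx
          rw [hdp] at hx
          rcases List.mem_map.mp hx with ⟨tp, htp, rfl⟩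
          have h2 := List.of_mem_filter htp
          have := hle tp (List.mem_of_mem_filter htp)
          simp at h2
          unfold lexLe at this; omega
        have hcs : chanStep p pd F (t, p) = (F.1 - 1, max F.2 (F.1 - 1)) := by
          simp [chanStep, show ¬ (p = pd) by omega]
          omega
        rw [filtmap_append_eq, filtmap_append_ne s t p pd (by omega), ← har, ← hdp, hcs,
            neededSpec_append_arr ar dp t hdep]
        have hm : max F.2 (F.1 - 1) = F.2 := max_eq_left (by omega)
        refine ⟨?_, ?_, ?_, ?_⟩
        · simp [List.length_append, ih1]; omega
        · exact le_max_right F.2 (F.1 - 1)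
        · exact le_trans ih3 (le_max_left F.2 (F.1 - 1))
        · exact hm.trans ih4
      · -- unrelated priority: nothing changes
        have hcs : chanStep pa pd F (t, p) = (F.1, max F.2 F.1) := by
          simp [chanStep, hpa, hpd]
        have hm : max F.2 F.1 = F.2 := max_eq_left ih2
        rw [filtmap_append_ne s t p pa hpa, filtmap_append_ne s t p pd hpd, ← har, ← hdp,
            hcs, hm]
        exact ⟨ih1, by simpa using ih2, ih3, ih4⟩

-- A's fused fold is the negation of the two channel scans
theorem step_split (a b A B : Int) (tp : Int × Int) :
    solveStep (a, b, A, B) tp =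
      (-(chanStep 1 3 (-A, -a) tp).2, -(chanStep 2 4 (-B, -b) tp).2,
       -(chanStep 1 3 (-A, -a) tp).1, -(chanStep 2 4 (-B, -b) tp).1) := by
  obtain ⟨t, p⟩ := tp
  simp only [solveStep, chanStep]
  split_ifs <;> simp_all [Prod.ext_iff, min_def, max_def] <;> omega

theorem fold_split (s : List (Int × Int)) (a b A B : Int) :
    s.foldl solveStep (a, b, A, B) =
      (-(s.foldl (chanStep 1 3) (-A, -a)).2, -(s.foldl (chanStep 2 4) (-B, -b)).2,
       -(s.foldl (chanStep 1 3) (-A, -a)).1, -(s.foldl (chanStep 2 4) (-B, -b)).1) := by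
  induction s generalizing a b A B with
  | nil => simp
  | cons hd tl ih =>
    simp only [List.foldl_cons, step_split]
    rw [ih]
    congr 1 <;> simp

-- sortedness of the extracted time lists
theorem filtmap_sorted (s : List (Int × Int)) (hs : s.Pairwise lexLe) (q : Int) :
    ((s.filter (fun tp => tp.2 == q)).map (fun tp => tp.1)).Pairwise (· ≤ ·) := by
  rw [List.pairwise_map]
  refine List.Pairwise.imp ?_ (List.Pairwise.filter _ hs)
  intro a b h
  unfold lexLe at h; omega

-- ===== VERDICT (by name: the statement is the Claim_ definition above) =====
theorem solve_spec : Claim_equal_solve := by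
  intro schedule _
  unfold Spec_solve solve solve_alt
  dsimp only
  set s := PySem.List.sorted2 schedule (fun x => x.1) (fun x => x.2) false with hsdef
  have hs : s.Pairwise lexLe := sorted2_pairwise_lex schedule
  obtain ⟨_, hA2, hA3, hA4⟩ := chan_main 1 3 (by omega) s hs
  obtain ⟨_, hB2, hB3, hB4⟩ := chan_main 2 4 (by omega) s hs
  rw [fold_split]
  simp only [neg_zero]
  rw [abs_of_nonpos (by omega), abs_of_nonpos (by omega), neg_neg, neg_neg, hA4, hB4]
  rw [needed_eq_spec _ _ (filtmap_sorted s hs 1) (filtmap_sorted s hs 3),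
      needed_eq_spec _ _ (filtmap_sorted s hs 2) (filtmap_sorted s hs 4)]
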